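-- pv_equiv track=rewrite | github.com/tjaekel/PYNQ-Z1_GenericQSPI_Blockdiagram | PYNQ-Z1_QSPI/HCC_QSPI.py | payload_checksum
-- ===== SOURCE A (Python) =====
-- def payload_checksum(data):
--     #it must be byte array
--     l = len(data) // 4
--     chs = 0;
--     for x in range(l):
--         w =      data[x*4 + 0]
--         w = w | (data[x*4 + 1] <<  8)
--         w = w | (data[x*4 + 2] << 16)
--         w = w | (data[x*4 + 3] << 24)
--         chs = chs + w
--     return ~chs & 0xFFFFFFFF
-- ===== SOURCE B (Python) =====
-- def payload_checksum(data):
--     n = len(data) - len(data) % 4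
--
--     def part(lo, hi):
--         # sum of the little-endian words of data[lo:hi]; hi - lo is a multiple of 4
--         if hi - lo == 4:
--             return data[lo] | data[lo + 1] << 8 | data[lo + 2] << 16 | data[lo + 3] << 24
--         if hi == lo:
--             return 0
--         mid = lo + (hi - lo) // 8 * 4
--         return part(lo, mid) + part(mid, hi)
--
--     return ~part(0, n) & 0xFFFFFFFF
-- ===== Notes on version B (the rewrite author's own statement) =====
-- stated objective: alternative
-- what changed: Replaces the linear shift-and-accumulate loop over word indices with a divide-and-conquer tree reduction that recursively halves the word range and adds the two partial sums, complementing and masking once at the end.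
import Mathlib
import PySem

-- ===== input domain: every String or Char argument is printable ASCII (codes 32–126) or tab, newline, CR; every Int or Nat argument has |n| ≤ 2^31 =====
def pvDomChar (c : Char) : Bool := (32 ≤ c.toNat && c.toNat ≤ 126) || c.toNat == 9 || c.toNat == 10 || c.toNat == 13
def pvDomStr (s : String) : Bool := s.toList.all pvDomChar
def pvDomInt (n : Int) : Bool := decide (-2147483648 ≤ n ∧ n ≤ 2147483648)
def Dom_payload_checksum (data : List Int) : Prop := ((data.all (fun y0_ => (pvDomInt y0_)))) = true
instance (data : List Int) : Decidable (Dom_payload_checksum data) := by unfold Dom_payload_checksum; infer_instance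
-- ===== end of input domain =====

-- B replaces A's linear shift-and-accumulate loop with a divide-and-conquer tree reduction over the word range (alternative; same cost).

-- ===== PORT A =====
def payload_checksum (data : List Int) : Int :=
  let l : Int := PySem.Int.floordiv (data.length : Int) 4
  let chs : Int := (PySem.List.pyRange 0 l 1).foldl (fun chs x =>
    let w := PySem.List.pyGetD data (x*4 + 0) 0
    let w := PySem.Int.bor w (PySem.List.pyGetD data (x*4 + 1) 0 <<< 8)
    let w := PySem.Int.bor w (PySem.List.pyGetD data (x*4 + 2) 0 <<< 16)
    let w := PySem.Int.bor w (PySem.List.pyGetD data (x*4 + 3) 0 <<< 24)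
    chs + w) 0
  PySem.Int.band (Int.not chs) 0xFFFFFFFF

-- ===== PORT B =====
-- the little-endian word starting at index lo (B's base case expression)
def pvWordB (data : List Int) (lo : Int) : Int :=
  PySem.Int.bor (PySem.Int.bor (PySem.Int.bor (PySem.List.pyGetD data lo 0)
    (PySem.List.pyGetD data (lo + 1) 0 <<< 8)) (PySem.List.pyGetD data (lo + 2) 0 <<< 16))
    (PySem.List.pyGetD data (lo + 3) 0 <<< 24)

-- Source B's 'part(lo, hi)': divide-and-conquer word-sum; the fuel is a totality
-- guard only (fuel = n on the actual call, which bounds the recursion depth)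
def pvPart (data : List Int) : Nat → Int → Int → Int
  | 0, _, _ => 0
  | fuel + 1, lo, hi =>
    if hi - lo = 4 then pvWordB data lo
    else if hi = lo then 0
    else
      let mid := lo + PySem.Int.floordiv (hi - lo) 8 * 4
      pvPart data fuel lo mid + pvPart data fuel mid hi

def payload_checksum_alt (data : List Int) : Int :=
  let n : Int := (data.length : Int) - PySem.Int.mod (data.length : Int) 4
  PySem.Int.band (Int.not (pvPart data n.toNat 0 n)) 0xFFFFFFFF

-- ===== PRECONDITION & SPEC =====
def Spec_payload_checksum (data : List Int) (out : Int) : Prop := out = payload_checksum_alt data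
instance (data : List Int) (out : Int) : Decidable (Spec_payload_checksum data out) := by unfold Spec_payload_checksum; infer_instance

-- ===== CLAIM (what is proved, stated in full; the proofs are below) =====
def Claim_equal_payload_checksum : Prop := ∀ (data : List Int), Dom_payload_checksum data → Spec_payload_checksum data (payload_checksum data)

-- ===== LEMMAS AND PROOFS =====

-- pvPart on a word-aligned range [4i, 4(i+m)) is the sum of the m words
theorem pvPart_eq (data : List Int) : ∀ (fuel i m : Nat), m ≤ fuel →
    pvPart data fuel (4 * (i : Int)) (4 * ((i + m : Nat) : Int)) =
      ((List.range' i m).map (fun (k : Nat) => pvWordB data (4 * (k : Int)))).sum := by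
  intro fuel
  induction fuel with
  | zero =>
    intro i m hm
    have hm0 : m = 0 := Nat.le_zero.mp hm
    subst hm0
    simp [pvPart]
  | succ f ih =>
    intro i m hm
    rcases m with _ | (_ | k)
    · have h1 : ¬ ((4:Int) * ((i + 0 : Nat) : Int) - 4 * (i : Int) = 4) := by push_cast; omega
      have h2 : (4:Int) * ((i + 0 : Nat) : Int) = 4 * (i : Int) := by push_cast; ring
      simp only [pvPart]
      rw [if_neg h1, if_pos h2]
      simp
    · have h1 : (4:Int) * ((i + 1 : Nat) : Int) - 4 * (i : Int) = 4 := by push_cast; ring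
      simp only [pvPart]
      rw [if_pos h1]
      simp [List.range'_one]
    · have h1 : ¬ ((4:Int) * ((i + (k+2) : Nat) : Int) - 4 * (i : Int) = 4) := by push_cast; omega
      have h2 : ¬ ((4:Int) * ((i + (k+2) : Nat) : Int) = 4 * (i : Int)) := by push_cast; omega
      have hmid : (4:Int) * (i : Int) +
          PySem.Int.floordiv ((4:Int) * ((i + (k+2) : Nat) : Int) - 4 * (i : Int)) 8 * 4 =
          4 * (((i + (k+2)/2 : Nat)) : Int) := by
        have hd : (4:Int) * ((i + (k+2) : Nat) : Int) - 4 * (i : Int) = (((4*(k+2) : Nat)) : Int) := by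
          push_cast; ring
        rw [hd, show ((8:Int)) = ((8:Nat) : Int) from by norm_num, PySem.Int.floordiv_natCast]
        have hq : (4*(k+2))/8 = (k+2)/2 := by omega
        rw [hq]
        push_cast; ring
      simp only [pvPart]
      rw [if_neg h1, if_neg h2]
      rw [hmid]
      have hhi : (i + (k+2) : Nat) = ((i + (k+2)/2) + ((k+2) - (k+2)/2)) := by omega
      rw [hhi]
      rw [ih i ((k+2)/2) (by omega), ih (i + (k+2)/2) ((k+2) - (k+2)/2) (by omega)]
      rw [← List.sum_append, ← List.map_append]
      have hr0 : List.range' i ((k+2)/2) ++ List.range' (i + 1 * ((k+2)/2)) ((k+2) - (k+2)/2) =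
          List.range' i ((k+2)/2 + ((k+2) - (k+2)/2)) := List.range'_append
      rw [one_mul] at hr0
      rw [hr0, show (k+2)/2 + ((k+2) - (k+2)/2) = k+1+1 from by omega]

-- B's result as the word sum over List.range (len / 4)
theorem altSide (data : List Int) :
    payload_checksum_alt data =
      PySem.Int.band (Int.not (((List.range (data.length / 4)).map
        (fun (k : Nat) => pvWordB data (4 * (k : Int)))).sum)) 0xFFFFFFFF := by
  have hn : (data.length : Int) - PySem.Int.mod (data.length : Int) 4 =
      ((4 * (data.length / 4) : Nat) : Int) := by
    rw [PySem.Int.mod_eq_emod_of_pos (by norm_num)]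
    omega
  show PySem.Int.band (Int.not (pvPart data
      ((data.length : Int) - PySem.Int.mod (data.length : Int) 4).toNat 0
      ((data.length : Int) - PySem.Int.mod (data.length : Int) 4))) 0xFFFFFFFF = _
  rw [hn]
  have h := pvPart_eq data (4 * (data.length / 4)) 0 (data.length / 4) (by omega)
  simp only [Nat.cast_zero, mul_zero, Nat.zero_add] at h
  rw [Int.toNat_natCast, show ((4 * (data.length / 4) : Nat) : Int) = 4 * ((data.length / 4 : Nat) : Int) from by push_cast; ring, h, List.range_eq_range']

theorem payload_chs_eq (data : List Int) :
    payload_checksum data = payload_checksum_alt data := by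
  have hl : PySem.Int.floordiv (data.length : Int) 4 = ((data.length / 4 : Nat) : Int) := by
    rw [PySem.Int.floordiv_eq_ediv_of_pos (by norm_num)]
    norm_num
  have key : (PySem.List.pyRange 0 ((data.length / 4 : Nat) : Int) 1).foldl
      (fun chs x => chs +
        PySem.Int.bor (PySem.Int.bor (PySem.Int.bor (PySem.List.pyGetD data (x*4 + 0) 0)
          (PySem.List.pyGetD data (x*4 + 1) 0 <<< 8)) (PySem.List.pyGetD data (x*4 + 2) 0 <<< 16))
          (PySem.List.pyGetD data (x*4 + 3) 0 <<< 24)) 0 =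
      ((List.range (data.length / 4)).map (fun (k : Nat) => pvWordB data (4 * (k : Int)))).sum := by
    rw [PySem.List.pyRange_zero_natCast, PySem.List.foldl_add, List.map_map]
    have hmap : ∀ k ∈ List.range (data.length / 4),
        ((fun x : Int =>
          PySem.Int.bor (PySem.Int.bor (PySem.Int.bor (PySem.List.pyGetD data (x*4 + 0) 0)
            (PySem.List.pyGetD data (x*4 + 1) 0 <<< 8)) (PySem.List.pyGetD data (x*4 + 2) 0 <<< 16))
            (PySem.List.pyGetD data (x*4 + 3) 0 <<< 24)) ∘ (fun k : Nat => (k : Int))) k =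
        pvWordB data (4 * (k : Int)) := by
      intro k _
      simp only [Function.comp]
      unfold pvWordB
      rw [show ((k:Int))*4 + 0 = 4 * (k:Int) from by ring,
          show ((k:Int))*4 + 1 = 4 * (k:Int) + 1 from by ring,
          show ((k:Int))*4 + 2 = 4 * (k:Int) + 2 from by ring,
          show ((k:Int))*4 + 3 = 4 * (k:Int) + 3 from by ring]
    rw [List.map_congr_left hmap, zero_add]
  rw [altSide]
  unfold payload_checksum
  rw [hl]
  exact congrArg (fun z : Int => PySem.Int.band (Int.not z) 4294967295) key

-- ===== VERDICT (by name: the statement is the Claim_ definition above) =====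
theorem payload_checksum_spec : Claim_equal_payload_checksum := by
  intro data _
  unfold Spec_payload_checksum
  exact payload_chs_eq data
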